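-- pv_equiv track=rewrite | github.com/NobuyukiInoue/LeetCode | Problems/2200_2299/2293_Min_Max_Game/Project_Python3/Min_Max_Game.py | minMaxGame_normal
-- ===== SOURCE A (Python) =====
-- from typing import List, Dict, Tuple
--
-- def minMaxGame_normal(nums: List[int]) -> int:
--     # 56ms - 140ms
--     while len(nums) > 1:
--         arr = []
--         for i in range(0, len(nums)//2):
--             if i % 2 == 0:
--                 arr.append(min(nums[2*i : 2*i + 2]))
--             else:
--                 arr.append(max(nums[2*i : 2*i + 2]))
--         nums = arr
--     return nums[0]
-- ===== SOURCE B (Python) =====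
-- def minMaxGame_normal(nums):
--     if len(nums) <= 1:
--         return nums[0]
--     nxt = [min(nums[2*i], nums[2*i+1]) if i % 2 == 0 else max(nums[2*i], nums[2*i+1])
--            for i in range(len(nums)//2)]
--     return minMaxGame_normal(nxt)
-- ===== Notes on version B (the rewrite author's own statement) =====
-- stated objective: alternative
-- what changed: The while-loop with an explicit accumulator list is replaced by direct recursion with a single comprehension per level that indexes the two pair elements instead of slicing and calling min/max on sublists.
import Mathlib
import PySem

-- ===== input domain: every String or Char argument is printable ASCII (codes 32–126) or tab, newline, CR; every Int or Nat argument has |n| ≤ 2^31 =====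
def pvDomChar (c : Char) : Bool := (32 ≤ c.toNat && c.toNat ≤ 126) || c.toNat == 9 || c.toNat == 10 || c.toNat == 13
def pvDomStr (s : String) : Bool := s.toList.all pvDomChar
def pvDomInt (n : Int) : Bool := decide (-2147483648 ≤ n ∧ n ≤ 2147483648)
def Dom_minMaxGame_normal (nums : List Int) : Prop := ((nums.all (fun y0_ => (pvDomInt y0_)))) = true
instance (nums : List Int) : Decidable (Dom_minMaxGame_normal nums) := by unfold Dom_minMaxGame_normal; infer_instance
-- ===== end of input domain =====

-- B replaces A's while-loop with accumulator list by direct recursion with one map per level,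
-- indexing pair elements instead of slicing; objective: alternative decomposition, same cost.


-- ===== PORT A =====
-- one iteration of A's while-body: arr = []; for i in range(len(nums)//2): append min/max of slice
def mmgStep (nums : List Int) : List Int :=
  (PySem.List.pyRange 0 ((nums.length / 2 : Nat) : Int) 1).foldl
    (fun arr i =>
      if i % 2 == 0 then
        arr ++ [(PySem.List.min? (PySem.List.slice nums (some (2*i)) (some (2*i + 2))) (fun y => y)).getD 0]
      else
        arr ++ [(PySem.List.max? (PySem.List.slice nums (some (2*i)) (some (2*i + 2))) (fun y => y)).getD 0]) []

theorem mmgStep_length (nums : List Int) : (mmgStep nums).length = nums.length / 2 := by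
  unfold mmgStep
  rw [show (fun (arr : List Int) (i : Int) =>
      if i % 2 == 0 then
        arr ++ [(PySem.List.min? (PySem.List.slice nums (some (2*i)) (some (2*i + 2))) (fun y => y)).getD 0]
      else
        arr ++ [(PySem.List.max? (PySem.List.slice nums (some (2*i)) (some (2*i + 2))) (fun y => y)).getD 0]) =
    (fun arr i => arr ++ [if i % 2 == 0 then
        (PySem.List.min? (PySem.List.slice nums (some (2*i)) (some (2*i + 2))) (fun y => y)).getD 0
      else
        (PySem.List.max? (PySem.List.slice nums (some (2*i)) (some (2*i + 2))) (fun y => y)).getD 0])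
    from by funext arr i; split <;> rfl]
  rw [PySem.List.foldl_append_singleton_eq_map]
  simp [PySem.List.length_pyRange_one]
  omega

-- while len(nums) > 1: nums = arr; return nums[0]   (nums[0] on [] raises in Python: excluded by Pre_)
def minMaxGame_normal (nums : List Int) : Int :=
  if _h : nums.length > 1 then minMaxGame_normal (mmgStep nums)
  else (PySem.List.pyGet? nums 0).getD 0
termination_by nums.length
decreasing_by rw [mmgStep_length]; omega

-- ===== PORT B =====
-- one level: [min(nums[2i],nums[2i+1]) if i%2==0 else max(...) for i in range(len(nums)//2)]
def altNext (nums : List Int) : List Int :=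
  (PySem.List.pyRange 0 ((nums.length / 2 : Nat) : Int) 1).map
    (fun i =>
      if i % 2 == 0 then min (PySem.List.pyGetD nums (2*i) 0) (PySem.List.pyGetD nums (2*i + 1) 0)
      else max (PySem.List.pyGetD nums (2*i) 0) (PySem.List.pyGetD nums (2*i + 1) 0))

theorem altNext_length (nums : List Int) : (altNext nums).length = nums.length / 2 := by
  unfold altNext; simp [PySem.List.length_pyRange_one]; omega

def minMaxGame_normal_alt (nums : List Int) : Int :=
  if _h : nums.length ≤ 1 then (PySem.List.pyGet? nums 0).getD 0
  else minMaxGame_normal_alt (altNext nums)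
termination_by nums.length
decreasing_by rw [altNext_length]; omega

-- ===== PRECONDITION & SPEC =====
-- Pre_ excludes only the empty list, on which Python A raises IndexError (nums[0]).
def Pre_minMaxGame_normal (nums : List Int) : Prop := nums ≠ []
instance (nums : List Int) : Decidable (Pre_minMaxGame_normal nums) := by unfold Pre_minMaxGame_normal; infer_instance
def pvWitness_minMaxGame_normal : List Int := [3, 1, 4, 1, 5]

def Spec_minMaxGame_normal (nums : List Int) (out : Int) : Prop := out = minMaxGame_normal_alt nums
instance (nums : List Int) (out : Int) : Decidable (Spec_minMaxGame_normal nums out) := by unfold Spec_minMaxGame_normal; infer_instance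

-- ===== CLAIM (what is proved, stated in full; the proofs are below) =====
def Claim_equal_minMaxGame_normal : Prop := ∀ (nums : List Int), Dom_minMaxGame_normal nums → Pre_minMaxGame_normal nums → Spec_minMaxGame_normal nums (minMaxGame_normal nums)

-- ===== LEMMAS AND PROOFS =====

theorem take_two_cons (a b : Int) (l : List Int) : List.take 2 (a :: b :: l) = [a, b] := by simp

theorem mmgStep_eq_altNext (nums : List Int) : mmgStep nums = altNext nums := by
  unfold mmgStep altNext
  rw [show (fun (arr : List Int) (i : Int) =>
      if i % 2 == 0 then
        arr ++ [(PySem.List.min? (PySem.List.slice nums (some (2*i)) (some (2*i + 2))) (fun y => y)).getD 0]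
      else
        arr ++ [(PySem.List.max? (PySem.List.slice nums (some (2*i)) (some (2*i + 2))) (fun y => y)).getD 0]) =
    (fun arr i => arr ++ [if i % 2 == 0 then
        (PySem.List.min? (PySem.List.slice nums (some (2*i)) (some (2*i + 2))) (fun y => y)).getD 0
      else
        (PySem.List.max? (PySem.List.slice nums (some (2*i)) (some (2*i + 2))) (fun y => y)).getD 0])
    from by funext arr i; split <;> rfl]
  rw [PySem.List.foldl_append_singleton_eq_map, List.nil_append]
  apply List.map_congr_left
  intro i hi
  rw [PySem.List.mem_pyRange_one] at hi
  obtain ⟨h0, hlt⟩ := hi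
  -- i = (k : Nat), with 2k+1 < nums.length
  obtain ⟨k, rfl⟩ := Int.eq_ofNat_of_zero_le h0
  have hk : 2 * k + 1 < nums.length := by omega
  have hslice : PySem.List.slice nums (some (2*(k:Int))) (some (2*(k:Int) + 2)) = [nums[2*k], nums[2*k+1]] := by
    have h2 : (2*(k:Int)) = ((2*k : Nat) : Int) := by push_cast; ring
    have h3 : (2*(k:Int) + 2) = ((2*k : Nat) : Int) + ((2 : Nat) : Int) := by push_cast; ring
    rw [h3, h2, PySem.List.slice_natCast_add]
    rw [show nums.drop (2*k) = nums[2*k] :: nums.drop (2*k+1) from List.drop_eq_getElem_cons (by omega),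
        show nums.drop (2*k+1) = nums[2*k+1] :: nums.drop (2*k+2) from List.drop_eq_getElem_cons (by omega)]
    exact take_two_cons _ _ _
  rw [hslice]
  have hg1 : PySem.List.pyGetD nums (2*(k:Int)) 0 = nums[2*k] := by
    rw [show (2*(k:Int)) = ((2*k : Nat) : Int) from by push_cast; ring, PySem.List.pyGetD_natCast]
    exact List.getD_eq_getElem _ _ (by omega)
  have hg2 : PySem.List.pyGetD nums (2*(k:Int) + 1) 0 = nums[2*k+1] := by
    rw [show (2*(k:Int) + 1) = ((2*k + 1 : Nat) : Int) from by push_cast; ring, PySem.List.pyGetD_natCast]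
    exact List.getD_eq_getElem _ _ (by omega)
  rw [hg1, hg2]
  split
  · rw [PySem.List.min?_id_cons]; simp
  · rw [PySem.List.max?_id_cons]; simp

theorem mmg_eq_alt (nums : List Int) : minMaxGame_normal nums = minMaxGame_normal_alt nums := by
  rw [minMaxGame_normal, minMaxGame_normal_alt]
  by_cases h : nums.length > 1
  · rw [dif_pos h, dif_neg (by omega)]
    rw [mmg_eq_alt (mmgStep nums), mmgStep_eq_altNext]
  · rw [dif_neg h, dif_pos (by omega)]
termination_by nums.length
decreasing_by rw [mmgStep_length]; omega

-- ===== VERDICT (by name: the statement is the Claim_ definition above) =====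
theorem minMaxGame_normal_spec : Claim_equal_minMaxGame_normal := by
  intro nums _ _
  unfold Spec_minMaxGame_normal
  exact mmg_eq_alt nums
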